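-- pv_equiv track=rewrite | github.com/jackyang25/universal-verifier-hypergraph | backend/src/ontology/normalize.py | _diagnosis_lineage_with_rules
-- ===== SOURCE A (Python) =====
-- DIAGNOSIS_SUPERTYPE_EXPANSIONS = {
--     "Dx.Preeclampsia": ("Dx.HypertensiveDisorder",),
--     "Dx.GestationalHypertension": ("Dx.HypertensiveDisorder",),
--     "Dx.Eclampsia": ("Dx.HypertensiveDisorder",),
--     "Dx.HELLPSyndrome": ("Dx.HypertensiveDisorder",),
-- }
--
-- def _diagnosis_lineage_with_rules(primary_dx_fact: str) -> tuple[list[str], list[str]]: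
--     expanded = {primary_dx_fact}
--     ordered_tokens = [primary_dx_fact]
--     queue = [primary_dx_fact]
--     rule_steps = [f"The selected diagnosis maps to canonical token {primary_dx_fact}."]
--
--     while queue:
--         current = queue.pop()
--         for supertype in DIAGNOSIS_SUPERTYPE_EXPANSIONS.get(current, ()):
--             rule_steps.append(
--                 f"{supertype} is a supertype of {current}, so include {supertype}."
--             )
--             if supertype in expanded:
--                 continue
--             expanded.add(supertype)
--             ordered_tokens.append(supertype)
--             queue.append(supertype)
--
--     return ordered_tokens, rule_steps
-- ===== SOURCE B (Python) =====
-- DIAGNOSIS_SUPERTYPE_EXPANSIONS = {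
--     "Dx.Preeclampsia": ("Dx.HypertensiveDisorder",),
--     "Dx.GestationalHypertension": ("Dx.HypertensiveDisorder",),
--     "Dx.Eclampsia": ("Dx.HypertensiveDisorder",),
--     "Dx.HELLPSyndrome": ("Dx.HypertensiveDisorder",),
-- }
--
-- def _diagnosis_lineage_with_rules(primary_dx_fact: str) -> tuple[list[str], list[str]]:
--     expanded = {primary_dx_fact}
--     ordered_tokens = [primary_dx_fact]
--     rule_steps = [f"The selected diagnosis maps to canonical token {primary_dx_fact}."]
--
--     def visit(current: str) -> None:
--         for supertype in DIAGNOSIS_SUPERTYPE_EXPANSIONS.get(current, ()):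
--             rule_steps.append(
--                 f"{supertype} is a supertype of {current}, so include {supertype}."
--             )
--             if supertype not in expanded:
--                 expanded.add(supertype)
--                 ordered_tokens.append(supertype)
--                 visit(supertype)
--
--     visit(primary_dx_fact)
--     return ordered_tokens, rule_steps
-- ===== Notes on version B (the rewrite author's own statement) =====
-- stated objective: simpler
-- what changed: The explicit worklist (queue + while/pop) is replaced by a recursive depth-first visit over the supertype map, removing the queue and the outer loop entirely.
import Mathlib
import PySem

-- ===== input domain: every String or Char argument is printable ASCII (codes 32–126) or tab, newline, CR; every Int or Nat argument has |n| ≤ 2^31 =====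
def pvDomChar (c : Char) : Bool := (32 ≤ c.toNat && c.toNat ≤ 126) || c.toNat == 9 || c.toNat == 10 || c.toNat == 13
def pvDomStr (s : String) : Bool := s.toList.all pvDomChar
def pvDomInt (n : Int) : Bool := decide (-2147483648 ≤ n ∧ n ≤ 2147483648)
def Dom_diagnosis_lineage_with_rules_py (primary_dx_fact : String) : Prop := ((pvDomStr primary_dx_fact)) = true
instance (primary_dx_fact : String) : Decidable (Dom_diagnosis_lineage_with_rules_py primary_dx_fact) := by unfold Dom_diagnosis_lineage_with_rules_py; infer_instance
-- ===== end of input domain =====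

-- B replaces A's explicit worklist loop with a recursive depth-first visit over the supertype map (objective: simpler).


-- the module constant DIAGNOSIS_SUPERTYPE_EXPANSIONS (shared context of both implementations)
def pvDSE : PySem.Dict String (List String) := PySem.Dict.ofList
  [("Dx.Preeclampsia", ["Dx.HypertensiveDisorder"]),
   ("Dx.GestationalHypertension", ["Dx.HypertensiveDisorder"]),
   ("Dx.Eclampsia", ["Dx.HypertensiveDisorder"]),
   ("Dx.HELLPSyndrome", ["Dx.HypertensiveDisorder"])]

-- ===== PORT A =====
-- state: (expanded, ordered_tokens, queue, rule_steps)
-- the inner 'for supertype in …' loop of A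
def pvForA (current : String) :
    List String → (PySem.Set String × List String × List String × List String) →
    (PySem.Set String × List String × List String × List String)
  | [], st => st
  | sup :: rest, (exp, ord, q, steps) =>
    let steps' := steps ++ [sup ++ " is a supertype of " ++ current ++ ", so include " ++ sup ++ "."]
    if PySem.Set.contains exp sup then pvForA current rest (exp, ord, q, steps')
    else pvForA current rest (PySem.Set.add exp sup, ord ++ [sup], q ++ [sup], steps')

-- the 'while queue' loop of A; fuel is only a totality guard (never exhausted: the expansion
-- map is one level deep, so the loop runs at most twice)
def pvLoopA : Nat → (PySem.Set String × List String × List String × List String) →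
    List String × List String
  | 0, (_, ord, _, steps) => (ord, steps)
  | n + 1, (exp, ord, q, steps) =>
    match q.getLast? with
    | none => (ord, steps)
    | some current =>
      pvLoopA n (pvForA current (pvDSE.getD current []) (exp, ord, q.dropLast, steps))

def diagnosis_lineage_with_rules_py (primary_dx_fact : String) : List String × List String :=
  pvLoopA 8
    (PySem.Set.ofList [primary_dx_fact], [primary_dx_fact], [primary_dx_fact],
     ["The selected diagnosis maps to canonical token " ++ primary_dx_fact ++ "."])

-- ===== PORT B =====
-- state: (expanded, ordered_tokens, rule_steps); pvVisitB is B's recursive 'visit' (its for-loop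
-- inlined as structural recursion on the supertype list); fuel only guards the recursive call
def pvVisitB : Nat → String → List String →
    (PySem.Set String × List String × List String) →
    (PySem.Set String × List String × List String)
  | 0, _, _, st => st
  | _ + 1, _, [], st => st
  | f + 1, current, sup :: rest, (exp, ord, steps) =>
    let steps' := steps ++ [sup ++ " is a supertype of " ++ current ++ ", so include " ++ sup ++ "."]
    if PySem.Set.contains exp sup then pvVisitB f current rest (exp, ord, steps')
    else
      let st' := (PySem.Set.add exp sup, ord ++ [sup], steps')
      pvVisitB f current rest (pvVisitB f sup (pvDSE.getD sup []) st')

def diagnosis_lineage_with_rules_py_alt (primary_dx_fact : String) : List String × List String :=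
  let st := pvVisitB 32 primary_dx_fact (pvDSE.getD primary_dx_fact [])
    (PySem.Set.ofList [primary_dx_fact], [primary_dx_fact],
     ["The selected diagnosis maps to canonical token " ++ primary_dx_fact ++ "."])
  (st.2.1, st.2.2)

-- ===== PRECONDITION & SPEC =====
def Spec_diagnosis_lineage_with_rules_py (primary_dx_fact : String) (out : List String × List String) : Prop := out = diagnosis_lineage_with_rules_py_alt primary_dx_fact
instance (primary_dx_fact : String) (out : List String × List String) : Decidable (Spec_diagnosis_lineage_with_rules_py primary_dx_fact out) := by unfold Spec_diagnosis_lineage_with_rules_py; infer_instance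

-- ===== CLAIM (what is proved, stated in full; the proofs are below) =====
def Claim_equal_diagnosis_lineage_with_rules_py : Prop := ∀ (primary_dx_fact : String), Dom_diagnosis_lineage_with_rules_py primary_dx_fact → Spec_diagnosis_lineage_with_rules_py primary_dx_fact (diagnosis_lineage_with_rules_py primary_dx_fact)

-- ===== LEMMAS AND PROOFS =====

-- ===== VERDICT (by name: the statement is the Claim_ definition above) =====
theorem diagnosis_lineage_with_rules_py_spec : Claim_equal_diagnosis_lineage_with_rules_py := by
  intro k _
  unfold Spec_diagnosis_lineage_with_rules_py
  by_cases h1 : k = "Dx.Preeclampsia"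
  · subst h1; decide
  by_cases h2 : k = "Dx.GestationalHypertension"
  · subst h2; decide
  by_cases h3 : k = "Dx.Eclampsia"
  · subst h3; decide
  by_cases h4 : k = "Dx.HELLPSyndrome"
  · subst h4; decide
  -- default case: k is not a key of the map, no expansion happens
  have hd : pvDSE = PySem.Dict.mk
      [("Dx.Preeclampsia", ["Dx.HypertensiveDisorder"]),
       ("Dx.GestationalHypertension", ["Dx.HypertensiveDisorder"]),
       ("Dx.Eclampsia", ["Dx.HypertensiveDisorder"]),
       ("Dx.HELLPSyndrome", ["Dx.HypertensiveDisorder"])] := by decide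
  have hget : pvDSE.getD k [] = [] := by
    rw [hd]
    simp [PySem.Dict.getD_eq_get?_getD,
      Ne.symm h1, Ne.symm h2, Ne.symm h3, Ne.symm h4, PySem.Dict.get?]
  simp [diagnosis_lineage_with_rules_py, diagnosis_lineage_with_rules_py_alt,
    pvLoopA, pvVisitB, pvForA, hget]
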